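-- pv_equiv track=rewrite | github.com/koushik2117/article-summarization-nlp | src/evaluate.py | check_data_integrity
-- ===== SOURCE A (Python) =====
-- from typing import Dict, List, Tuple
--
-- def check_data_integrity(records: List[Dict]) -> Dict[str, int]:
--     """
--     Run basic integrity checks on the evaluation dataset.
--
--     Returns counts of issues found:
--     - ``empty_article``: records with blank articles.
--     - ``empty_summary``: records with blank summaries.
--     - ``duplicates``: duplicate article texts.
--     """
--     issues = {"empty_article": 0, "empty_summary": 0, "duplicates": 0}
--     seen_articles = set()
--
--     for rec in records:
--         art = rec.get("article", "").strip()
--         summ = rec.get("summary", "").strip()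
--
--         if not art:
--             issues["empty_article"] += 1
--         if not summ:
--             issues["empty_summary"] += 1
--         if art in seen_articles:
--             issues["duplicates"] += 1
--         seen_articles.add(art)
--
--     return issues
-- ===== SOURCE B (Python) =====
-- def check_data_integrity(records):
--     arts = [rec.get("article", "").strip() for rec in records]
--     summs = [rec.get("summary", "").strip() for rec in records]
--     return {
--         "empty_article": sum(1 for a in arts if not a),
--         "empty_summary": sum(1 for s in summs if not s),
--         "duplicates": len(arts) - len(set(arts)),
--     }
-- ===== Notes on version B (the rewrite author's own statement) =====
-- stated objective: alternative
-- what changed: Replaces the single stateful loop (three in-dict counters plus a running seen-set with a per-record membership test) by two comprehensions and closed-form counts: empties via sum-over-comprehension and duplicates as len(arts) - len(set(arts)).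
import Mathlib
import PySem

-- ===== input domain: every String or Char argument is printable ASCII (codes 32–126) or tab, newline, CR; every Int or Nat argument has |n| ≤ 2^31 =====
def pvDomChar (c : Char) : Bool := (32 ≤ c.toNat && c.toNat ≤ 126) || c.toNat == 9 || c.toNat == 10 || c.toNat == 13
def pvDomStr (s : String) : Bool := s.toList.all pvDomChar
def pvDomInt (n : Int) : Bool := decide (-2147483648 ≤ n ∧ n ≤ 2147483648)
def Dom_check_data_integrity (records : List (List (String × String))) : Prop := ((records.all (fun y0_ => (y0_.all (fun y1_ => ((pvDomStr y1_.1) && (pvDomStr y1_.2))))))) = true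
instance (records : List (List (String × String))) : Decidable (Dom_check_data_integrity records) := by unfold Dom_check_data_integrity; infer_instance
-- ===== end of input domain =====

-- ===== PORT A =====
-- B replaces A's single stateful loop (dict counters + running seen-set) by comprehensions and
-- closed-form counts (duplicates = len - len(set)); same cost, different decomposition.

-- the body of A's "for rec in records" loop, step for step
def pvStepA (st : PySem.Dict String Int × PySem.Set String) (rec : List (String × String)) :
    PySem.Dict String Int × PySem.Set String :=
  let art := PySem.Str.strip ((PySem.Dict.mk rec).getD "article" "")
  let summ := PySem.Str.strip ((PySem.Dict.mk rec).getD "summary" "")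
  let issues := if art = "" then st.1.modify "empty_article" 0 (· + 1) else st.1
  let issues := if summ = "" then issues.modify "empty_summary" 0 (· + 1) else issues
  let issues := if PySem.Set.contains st.2 art then issues.modify "duplicates" 0 (· + 1) else issues
  (issues, PySem.Set.add st.2 art)

def check_data_integrity (records : List (List (String × String))) : List (String × Int) :=
  let issues : PySem.Dict String Int :=
    PySem.Dict.mk [("empty_article", 0), ("empty_summary", 0), ("duplicates", 0)]
  let res := records.foldl pvStepA (issues, PySem.Set.empty)
  res.1.items

-- ===== PORT B =====
def check_data_integrity_alt (records : List (List (String × String))) : List (String × Int) :=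
  let arts := records.map (fun rec => PySem.Str.strip ((PySem.Dict.mk rec).getD "article" ""))
  let summs := records.map (fun rec => PySem.Str.strip ((PySem.Dict.mk rec).getD "summary" ""))
  [("empty_article", (arts.countP (fun a => a = "") : Int)),
   ("empty_summary", (summs.countP (fun s => s = "") : Int)),
   ("duplicates", (arts.length : Int) - ((PySem.Set.ofList arts).length : Int))]

-- ===== PRECONDITION & SPEC =====
def Spec_check_data_integrity (records : List (List (String × String))) (out : List (String × Int)) : Prop := out = check_data_integrity_alt records
instance (records : List (List (String × String))) (out : List (String × Int)) : Decidable (Spec_check_data_integrity records out) := by unfold Spec_check_data_integrity; infer_instance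

-- ===== CLAIM (what is proved, stated in full; the proofs are below) =====
def Claim_equal_check_data_integrity : Prop := ∀ (records : List (List (String × String))), Dom_check_data_integrity records → Spec_check_data_integrity records (check_data_integrity records)

-- ===== LEMMAS AND PROOFS =====

-- the stripped article / summary of one record (used only in the proofs)
def pvArt (rec : List (String × String)) : String :=
  PySem.Str.strip ((PySem.Dict.mk rec).getD "article" "")

def pvSumm (rec : List (String × String)) : String :=
  PySem.Str.strip ((PySem.Dict.mk rec).getD "summary" "")

-- one loop step on the literal 3-key counter dict
lemma pv_step_eq (rec : List (String × String)) (e1 e2 d : Int) (seen : PySem.Set String) :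
    pvStepA (PySem.Dict.mk [("empty_article", e1), ("empty_summary", e2), ("duplicates", d)], seen) rec
    = (PySem.Dict.mk
        [("empty_article", if pvArt rec = "" then e1 + 1 else e1),
         ("empty_summary", if pvSumm rec = "" then e2 + 1 else e2),
         ("duplicates", if pvArt rec ∈ seen then d + 1 else d)],
       PySem.Set.add seen (pvArt rec)) := by
  simp only [pvStepA, pvArt, pvSumm]
  by_cases ha : PySem.Str.strip ((PySem.Dict.mk rec).getD "article" "") = "" <;>
  by_cases hs : PySem.Str.strip ((PySem.Dict.mk rec).getD "summary" "") = "" <;>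
  simp only [ha, hs, PySem.Set.contains_eq_listContains, List.contains_eq_mem, decide_eq_true_eq,
    if_true, if_false, iff_true, iff_false] <;>
  split_ifs <;> rfl

-- A's loop, characterised: counters accumulate closed-form counts, seen accumulates Set.update.
lemma pv_loop (recs : List (List (String × String))) :
    ∀ (e1 e2 d : Int) (seen : PySem.Set String),
    recs.foldl pvStepA
      (PySem.Dict.mk [("empty_article", e1), ("empty_summary", e2), ("duplicates", d)], seen)
    = (PySem.Dict.mk
        [("empty_article", e1 + ((recs.map pvArt).countP (fun a => a = "") : Int)),
         ("empty_summary", e2 + ((recs.map pvSumm).countP (fun s => s = "") : Int)),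
         ("duplicates", d + ((recs.length : Int) + (seen.length : Int)
             - ((PySem.Set.update seen (recs.map pvArt)).length : Int)))],
       PySem.Set.update seen (recs.map pvArt)) := by
  induction recs with
  | nil => intro e1 e2 d seen; simp [PySem.Set.update]
  | cons rec recs ih =>
    intro e1 e2 d seen
    rw [List.foldl_cons, pv_step_eq, ih, List.map_cons, PySem.Set.update_cons]
    simp only [Prod.mk.injEq, PySem.Dict.mk.injEq, List.cons.injEq, Prod.mk.injEq,
      List.countP_cons, List.length_cons, and_true, true_and]
    refine ⟨?_, ?_, ?_⟩
    · by_cases ha : pvArt rec = "" <;> simp [ha] <;> push_cast <;> ring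
    · by_cases hs : pvSumm rec = "" <;> simp [hs, List.map_cons, List.countP_cons] <;>
        push_cast <;> ring
    · by_cases hm : pvArt rec ∈ seen
      · rw [PySem.Set.add_of_mem hm, if_pos hm]; push_cast; ring
      · rw [PySem.Set.add_of_not_mem hm, if_neg hm]
        simp only [List.length_append, List.length_cons, List.length_nil]
        push_cast; ring

-- ===== VERDICT (by name: the statement is the Claim_ definition above) =====
theorem check_data_integrity_spec : Claim_equal_check_data_integrity := by
  intro records _
  show check_data_integrity records = check_data_integrity_alt records
  simp only [check_data_integrity, check_data_integrity_alt]
  rw [pv_loop]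
  have hA : pvArt = fun rec => PySem.Str.strip ((PySem.Dict.mk rec).getD "article" "") := rfl
  have hS : pvSumm = fun rec => PySem.Str.strip ((PySem.Dict.mk rec).getD "summary" "") := rfl
  simp [hA, hS, PySem.Set.empty, PySem.Set.update_nil_left]
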